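-- pv_equiv track=rewrite | github.com/wssun/EACS | Extractor_ classifier/make_label/make_dataset_label.py | split_java_to_seqs
-- ===== SOURCE A (Python) =====
-- def split_java_to_seqs(code_token_list):
--     lf_bracket_up = 0
--     idxs = []
--
--     end_idx = 0
--
--     for idx, i in enumerate(code_token_list):
--         if i == ';' and not lf_bracket_up:
--             idxs.append((end_idx, idx))
--             end_idx = idx + 1
--         elif i == '(':
--             lf_bracket_up += 1
--         elif i == ')':
--             lf_bracket_up -= 1
--         elif i == '{':
--             idxs.append((end_idx, idx))
--             end_idx = idx + 1
--         elif i == '}':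
--             end_idx = idx + 1
--
--     code_seqs = []
--     for idx, i in enumerate(idxs):
--         code_snap = code_token_list[i[0]:i[1] + 1]
--         if code_snap[-1] == '{':
--             code_seqs.append(' '.join(code_snap) + ' }')
--         else:
--             code_seqs.append(' '.join(code_snap))
--     return code_seqs
-- ===== SOURCE B (Python) =====
-- def split_java_to_seqs(code_token_list):
--     seqs = []
--     current = []
--     depth = 0
--     for tok in code_token_list:
--         current.append(tok)
--         if tok == '(':
--             depth += 1
--         elif tok == ')':
--             depth -= 1
--         elif tok == ';' and depth == 0:
--             seqs.append(' '.join(current))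
--             current = []
--         elif tok == '{':
--             seqs.append(' '.join(current) + ' }')
--             current = []
--         elif tok == '}':
--             current = []
--     return seqs
-- ===== Notes on version B (the rewrite author's own statement) =====
-- stated objective: simpler
-- what changed: Single fused parse-and-emit pass carrying a token buffer and paren depth, emitting joined segments directly, instead of building an index-pair list and then a second slicing/joining pass over it.
import Mathlib
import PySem

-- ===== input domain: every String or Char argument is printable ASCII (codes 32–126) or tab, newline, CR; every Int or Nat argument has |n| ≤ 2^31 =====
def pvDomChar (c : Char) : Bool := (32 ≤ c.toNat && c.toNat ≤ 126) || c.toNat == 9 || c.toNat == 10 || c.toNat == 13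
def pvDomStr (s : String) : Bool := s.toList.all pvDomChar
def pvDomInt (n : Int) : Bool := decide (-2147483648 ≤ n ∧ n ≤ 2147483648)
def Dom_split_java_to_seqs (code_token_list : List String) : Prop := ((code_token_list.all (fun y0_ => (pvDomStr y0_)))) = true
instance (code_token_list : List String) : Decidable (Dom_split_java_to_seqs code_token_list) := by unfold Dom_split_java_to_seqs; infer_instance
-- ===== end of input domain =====

-- B fuses A's two passes (collect index pairs, then slice-and-join) into one parse-and-emit
-- pass carrying a token buffer; same return value, objective: simpler.

-- ===== PORT A =====
-- first loop body: state = (lf_bracket_up, idxs, end_idx)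
def pvAStep (st : Int × List (Int × Int) × Int) (p : Int × String) :
    Int × List (Int × Int) × Int :=
  let (lf, idxs, end_idx) := st
  let (idx, i) := p
  if i == ";" && lf == 0 then (lf, idxs ++ [(end_idx, idx)], idx + 1)
  else if i == "(" then (lf + 1, idxs, end_idx)
  else if i == ")" then (lf - 1, idxs, end_idx)
  else if i == "{" then (lf, idxs ++ [(end_idx, idx)], idx + 1)
  else if i == "}" then (lf, idxs, idx + 1)
  else (lf, idxs, end_idx)

-- second loop body: slice the original list, join, special-case a trailing '{'
-- (code_snap[-1] via pyGet?: 'none' would be Python's IndexError, but A's pairs always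
-- give a nonempty slice, so the else-branch is what Python computes everywhere)
def pvAEmit (code_token_list : List String) (seqs : List String) (i : Int × Int) :
    List String :=
  let code_snap := PySem.List.slice code_token_list (some i.1) (some (i.2 + 1))
  if PySem.List.pyGet? code_snap (-1) == some "{" then
    seqs ++ [PySem.Str.join " " code_snap ++ " }"]
  else
    seqs ++ [PySem.Str.join " " code_snap]

def split_java_to_seqs (code_token_list : List String) : List String :=
  let st := (PySem.List.enumerate code_token_list).foldl pvAStep (0, [], 0)
  st.2.1.foldl (pvAEmit code_token_list) []

-- ===== PORT B =====
-- the single fused pass: state = (seqs, current, depth)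
def pvBStep (st : List String × List String × Int) (tok : String) :
    List String × List String × Int :=
  let (seqs, current, depth) := st
  let current := current ++ [tok]
  if tok == "(" then (seqs, current, depth + 1)
  else if tok == ")" then (seqs, current, depth - 1)
  else if tok == ";" && depth == 0 then (seqs ++ [PySem.Str.join " " current], [], depth)
  else if tok == "{" then (seqs ++ [PySem.Str.join " " current ++ " }"], [], depth)
  else if tok == "}" then (seqs, [], depth)
  else (seqs, current, depth)

def split_java_to_seqs_alt (code_token_list : List String) : List String :=
  (code_token_list.foldl pvBStep ([], [], 0)).1

-- ===== PRECONDITION & SPEC =====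
def Spec_split_java_to_seqs (code_token_list : List String) (out : List String) : Prop := out = split_java_to_seqs_alt code_token_list
instance (code_token_list : List String) (out : List String) : Decidable (Spec_split_java_to_seqs code_token_list out) := by unfold Spec_split_java_to_seqs; infer_instance

-- ===== CLAIM (what is proved, stated in full; the proofs are below) =====
def Claim_equal_split_java_to_seqs : Prop := ∀ (code_token_list : List String), Dom_split_java_to_seqs code_token_list → Spec_split_java_to_seqs code_token_list (split_java_to_seqs code_token_list)

-- ===== LEMMAS AND PROOFS =====

-- last element of a snoc under Python's xs[-1]
theorem pvPyGet_snoc_neg_one {α : Type} (l : List α) (x : α) :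
    PySem.List.pyGet? (l ++ [x]) (-1) = some x := by
  simp [PySem.List.pyGet?, PySem.List.pyIdx?]

theorem pvSlice_extend (xs : List String) (e k : Nat) (t : String) (rest : List String)
    (he : e ≤ k) (hd : xs.drop k = t :: rest) :
    (xs.drop e).take (k + 1 - e) = (xs.drop e).take (k - e) ++ [t] := by
  have h1 : k + 1 - e = (k - e) + 1 := by omega
  have hk : xs[k]? = some t := by
    have h0 : (xs.drop k)[0]? = some t := by rw [hd]; rfl
    simpa using h0
  have h2 : (xs.drop e)[k - e]? = some t := by
    rw [List.getElem?_drop]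
    have : e + (k - e) = k := by omega
    rw [this, hk]
  rw [h1, List.take_add_one, h2]
  rfl

theorem pvPhase2_eq_map (xs : List String) (idxs : List (Int × Int)) (acc : List String) :
    idxs.foldl (pvAEmit xs) acc
      = acc ++ idxs.map (fun i =>
          let snap := PySem.List.slice xs (some i.1) (some (i.2 + 1))
          if PySem.List.pyGet? snap (-1) == some "{" then PySem.Str.join " " snap ++ " }"
          else PySem.Str.join " " snap) := by
  induction idxs generalizing acc with
  | nil => simp
  | cons h tl ih =>
    rw [List.foldl_cons, ih]
    simp only [pvAEmit, List.map_cons]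
    split <;> simp


theorem pvMain (xs : List String) :
    ∀ (rest : List String) (k e : Nat) (lf : Int) (idxs : List (Int × Int)),
      xs.drop k = rest → e ≤ k →
      (((PySem.List.enumerate rest k).foldl pvAStep (lf, idxs, (e : Int))).2.1.foldl
          (pvAEmit xs) [])
        = (rest.foldl pvBStep (idxs.foldl (pvAEmit xs) [], (xs.drop e).take (k - e), lf)).1 := by
  intro rest
  induction rest with
  | nil => intro k e lf idxs _ _; simp [PySem.List.enumerate_nil]
  | cons t rs ih =>
    intro k e lf idxs hd he
    have hd' : xs.drop (k + 1) = rs := by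
      have h : xs.drop (k + 1) = (xs.drop k).drop 1 := by rw [List.drop_drop]
      rw [h, hd]; rfl
    have hcast : ((k : Int) + 1) = ((k + 1 : Nat) : Int) := by push_cast; ring
    have hsnoc := pvSlice_extend xs e k t rs he hd
    rw [PySem.List.enumerate_cons, List.foldl_cons, List.foldl_cons]
    by_cases h1 : t = "("
    · subst h1
      simp only [pvAStep, pvBStep]
      simp only [hcast, ← hsnoc]
      simp
      exact ih (k+1) e (lf+1) idxs hd' (by omega)
    · by_cases h2 : t = ")"
      · subst h2
        simp only [pvAStep, pvBStep]
        simp only [hcast, ← hsnoc]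
        simp
        exact ih (k+1) e (lf-1) idxs hd' (by omega)
      · by_cases h3 : t = ";"
        · subst h3
          by_cases hlf : lf = 0
          · subst hlf
            simp only [pvAStep, pvBStep]
            simp only [hcast]
            simp
            rw [hcast]
            rw [ih (k+1) (k+1) 0 (idxs ++ [((e:Int), (k:Int))]) hd' (by omega)]
            simp only [Nat.sub_self, List.take_zero]
            congr 1
            rw [pvPhase2_eq_map, pvPhase2_eq_map]
            simp only [List.map_append, List.map_cons, List.map_nil, List.append_assoc]
            congr 2
            have hsl : PySem.List.slice xs (some (e:Int)) (some ((k:Int) + 1))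
                = (xs.drop e).take (k - e) ++ [";"] := by
              rw [hcast, PySem.List.slice_natCast, ← hsnoc]
            rw [hsl, pvPyGet_snoc_neg_one]
            simp
          · simp only [pvAStep, pvBStep]
            simp only [hcast, ← hsnoc]
            simp [hlf]
            exact ih (k+1) e lf idxs hd' (by omega)
        · by_cases h4 : t = "{"
          · subst h4
            simp only [pvAStep, pvBStep]
            simp only [hcast]
            simp
            rw [hcast]
            rw [ih (k+1) (k+1) lf (idxs ++ [((e:Int), (k:Int))]) hd' (by omega)]
            simp only [Nat.sub_self, List.take_zero]
            congr 1
            rw [pvPhase2_eq_map, pvPhase2_eq_map]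
            simp only [List.map_append, List.map_cons, List.map_nil, List.append_assoc]
            congr 2
            have hsl : PySem.List.slice xs (some (e:Int)) (some ((k:Int) + 1))
                = (xs.drop e).take (k - e) ++ ["{"] := by
              rw [hcast, PySem.List.slice_natCast, ← hsnoc]
            rw [hsl, pvPyGet_snoc_neg_one]
            simp
          · by_cases h5 : t = "}"
            · subst h5
              simp only [pvAStep, pvBStep]
              simp only [hcast]
              simp
              rw [hcast]
              rw [ih (k+1) (k+1) lf idxs hd' (by omega)]
              simp
            · simp only [pvAStep, pvBStep]
              simp only [hcast, ← hsnoc]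
              simp [h1, h2, h3, h4, h5]
              exact ih (k+1) e lf idxs hd' (by omega)

-- ===== VERDICT (by name: the statement is the Claim_ definition above) =====
theorem split_java_to_seqs_spec : Claim_equal_split_java_to_seqs := by
  intro xs _
  unfold Spec_split_java_to_seqs split_java_to_seqs split_java_to_seqs_alt
  have h := pvMain xs xs 0 0 0 [] (by simp) (Nat.le_refl 0)
  simpa using h
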